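-- pv_equiv track=rewrite | github.com/kalelpida/hypatia | papier2/paper3.py | divise_campagnes
-- ===== SOURCE A (Python) =====
-- import re, copy
--
-- def divise_campagnes(campagne, cles, nbprocs):
--     # diviser la campagne en sous-campagnes, en fonction du nombre de processus max.
--     # les clés triées permettent de minimiser le nombre d'actions avant la simulation elle-même.
--     # Dans le cas d'expériences courtes et beaucoup de processeurs, pour aller plus vite il vaudrait mieux diviser jusqu'à avoir des campagnes à expérience unique
--     sous_campagnes=[campagne]
--     while len(cles) and nbprocs>len(sous_campagnes):
--         cle=cles.pop(0)
--         n_ss_cpgns=len(sous_campagnes)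
--         for _ in range(n_ss_cpgns):
--             ss_cpgn=sous_campagnes.pop(0)
--             val_possibles=ss_cpgn[cle]
--             for val in val_possibles:
--                 nvl_ss_cpgn=copy.deepcopy(ss_cpgn)
--                 nvl_ss_cpgn[cle]=[val]
--                 sous_campagnes.append(nvl_ss_cpgn)
--     return sous_campagnes
-- ===== SOURCE B (Python) =====
-- # B: instead of repeatedly splitting the queue of sub-campaigns key by key (deep-copying
-- # intermediate campaigns at every level), first decide which keys get split (a small loop
-- # tracking the product of value-list sizes), then build each final sub-campaign once as a
-- # cartesian product.  Like A, it consumes the chosen keys from `cles` in place.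
-- import copy, itertools
--
-- def divise_campagnes(campagne, cles, nbprocs):
--     consumed = []
--     prod = 1
--     while cles and nbprocs > prod:
--         k = cles.pop(0)
--         if k not in consumed:
--             consumed.append(k)
--             prod *= len(campagne.get(k, []))
--     resultat = []
--     for combo in itertools.product(*(campagne.get(k, []) for k in consumed)):
--         nouvelle = copy.deepcopy(campagne)
--         for k, v in zip(consumed, combo):
--             nouvelle[k] = [v]
--         resultat.append(nouvelle)
--     return resultat
-- ===== Notes on version B (the rewrite author's own statement) =====
-- stated objective: alternative
-- what changed: A repeatedly splits a queue of sub-campaigns key by key, deep-copying every intermediate campaign; B first decides in a small loop which keys get split (tracking the product of their value-list sizes, which equals A's queue length), then builds each final sub-campaign once as one itertools.product over those keys.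
import Mathlib
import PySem

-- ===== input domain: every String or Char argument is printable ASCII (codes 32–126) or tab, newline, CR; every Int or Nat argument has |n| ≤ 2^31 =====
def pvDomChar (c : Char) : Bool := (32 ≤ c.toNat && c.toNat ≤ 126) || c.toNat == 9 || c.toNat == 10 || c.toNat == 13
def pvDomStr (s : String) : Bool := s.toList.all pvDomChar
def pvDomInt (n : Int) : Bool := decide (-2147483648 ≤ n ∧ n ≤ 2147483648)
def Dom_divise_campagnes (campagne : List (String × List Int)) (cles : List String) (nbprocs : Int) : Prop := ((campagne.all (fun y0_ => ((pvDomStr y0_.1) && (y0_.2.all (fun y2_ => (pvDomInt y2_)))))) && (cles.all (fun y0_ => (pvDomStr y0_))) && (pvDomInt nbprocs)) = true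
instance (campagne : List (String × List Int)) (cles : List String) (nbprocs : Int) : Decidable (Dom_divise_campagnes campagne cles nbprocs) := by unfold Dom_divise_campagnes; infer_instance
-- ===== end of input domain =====

-- B builds the sub-campaigns as one cartesian product over the consumed keys instead of
-- A's level-by-level queue splitting (objective: alternative).  Both Pythons mutate `cles`
-- in place the same way (pop(0) per consumed key); A may return the original campagne
-- object where B returns a copy — the equivalence proved here is about return VALUES.

-- dict lookup c[k] / c.get(k, default): first matching key
def pvGet? (c : List (String × List Int)) (k : String) : Option (List Int) :=
  match c with
  | [] => none
  | (k', v') :: rest => if k' = k then some v' else pvGet? rest k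

-- value list of key k, [] when absent (Python A raises there; excluded by Pre_)
def pvVals (c : List (String × List Int)) (k : String) : List Int :=
  (pvGet? c k).getD []

-- dict assignment c[k] = v: overwrite first match in place, else append (exact for a Python dict)
def pvSet (c : List (String × List Int)) (k : String) (v : List Int) : List (String × List Int) :=
  match c with
  | [] => [(k, v)]
  | (k', v') :: rest => if k' = k then (k, v) :: rest else (k', v') :: pvSet rest k v

-- ===== PORT A =====
-- A's inner `for _ in range(n_ss_cpgns): ss_cpgn = sous_campagnes.pop(0); … append(…)`
-- ([] case: Python's pop(0) would raise IndexError; unreachable since n is the initial length)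
def pvInner (k : String) : Nat → List (List (String × List Int)) → List (List (String × List Int))
  | 0, subs => subs
  | _ + 1, [] => []
  | n + 1, s :: rest => pvInner k n (rest ++ (pvVals s k).map (fun v => pvSet s k [v]))

-- A's `while len(cles) and nbprocs > len(sous_campagnes): cle = cles.pop(0); …`
def pvLoopA (nbprocs : Int) : List String → List (List (String × List Int)) → List (List (String × List Int))
  | [], subs => subs
  | c :: rest, subs =>
      if nbprocs > (subs.length : Int) then pvLoopA nbprocs rest (pvInner c subs.length subs)
      else subs

def divise_campagnes (campagne : List (String × List Int)) (cles : List String) (nbprocs : Int) : List (List (String × List Int)) :=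
  pvLoopA nbprocs cles [campagne]

-- ===== PORT B =====
-- B's `while cles and nbprocs > prod: k = cles.pop(0); if k not in consumed: …`
def pvConsume (campagne : List (String × List Int)) (nbprocs : Int) : List String → List String → Int → List String
  | [], consumed, _ => consumed
  | k :: rest, consumed, prod =>
      if nbprocs > prod then
        if consumed.contains k then pvConsume campagne nbprocs rest consumed prod
        else pvConsume campagne nbprocs rest (consumed ++ [k]) (prod * ((pvVals campagne k).length : Int))
      else consumed

-- itertools.product: first list varies slowest
def pvProduct : List (List Int) → List (List Int)
  | [] => [[]]
  | vs :: rest => vs.flatMap (fun v => (pvProduct rest).map (fun combo => v :: combo))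

def divise_campagnes_alt (campagne : List (String × List Int)) (cles : List String) (nbprocs : Int) : List (List (String × List Int)) :=
  let consumed := pvConsume campagne nbprocs cles [] 1
  (pvProduct (consumed.map (pvVals campagne))).map
    (fun combo => (consumed.zip combo).foldl (fun c kv => pvSet c kv.1 [kv.2]) campagne)

-- ===== PRECONDITION & SPEC =====
-- size of the value list stored under key k (0 when the key is absent)
def pvLen0 (c : List (String × List Int)) (k : String) : Int :=
  ((c.find? (fun p => p.1 == k)).map (fun p => (p.2.length : Int))).getD 0

-- product of the value-list sizes of the distinct keys among ks (A's queue length after consuming ks)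
def pvProdSet (c : List (String × List Int)) (ks : List String) : Int :=
  (ks.dedup.map (pvLen0 c)).prod

-- Pre_ = exactly the inputs on which Python A returns: A raises KeyError iff some key of
-- cles is consumed while sub-campaigns remain (the product of value-list sizes over the
-- distinct keys before it is positive and still below nbprocs) but is absent from campagne.
def Pre_divise_campagnes (campagne : List (String × List Int)) (cles : List String) (nbprocs : Int) : Prop :=
  ∀ i ∈ List.range cles.length,
    0 < pvProdSet campagne (cles.take i) → pvProdSet campagne (cles.take i) < nbprocs →
      cles.getD i "" ∈ campagne.map Prod.fst

instance (campagne : List (String × List Int)) (cles : List String) (nbprocs : Int) : Decidable (Pre_divise_campagnes campagne cles nbprocs) := by unfold Pre_divise_campagnes; infer_instance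

def pvWitness_divise_campagnes : (List (String × List Int)) × List String × Int :=
  ([("a", [1, 2])], ["a"], 2)

def Spec_divise_campagnes (campagne : List (String × List Int)) (cles : List String) (nbprocs : Int) (out : List (List (String × List Int))) : Prop := out = divise_campagnes_alt campagne cles nbprocs
instance (campagne : List (String × List Int)) (cles : List String) (nbprocs : Int) (out : List (List (String × List Int))) : Decidable (Spec_divise_campagnes campagne cles nbprocs out) := by unfold Spec_divise_campagnes; infer_instance

-- ===== CLAIM (what is proved, stated in full; the proofs are below) =====
def Claim_equal_divise_campagnes : Prop := ∀ (campagne : List (String × List Int)) (cles : List String) (nbprocs : Int), Dom_divise_campagnes campagne cles nbprocs → Pre_divise_campagnes campagne cles nbprocs → Spec_divise_campagnes campagne cles nbprocs (divise_campagnes campagne cles nbprocs)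

-- ===== LEMMAS AND PROOFS =====

-- the family of sub-campaigns determined by a list of consumed keys
def pvBuild (campagne : List (String × List Int)) (consumed : List String) : List (List (String × List Int)) :=
  (pvProduct (consumed.map (pvVals campagne))).map
    (fun combo => (consumed.zip combo).foldl (fun c kv => pvSet c kv.1 [kv.2]) campagne)

def pvIntProd (campagne : List (String × List Int)) (consumed : List String) : Int :=
  (consumed.map (fun k => ((pvVals campagne k).length : Int))).prod

theorem pvGet?_set_self (c : List (String × List Int)) (k : String) (v : List Int) :
    pvGet? (pvSet c k v) k = some v := by
  induction c with
  | nil => simp [pvSet, pvGet?]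
  | cons p rest ih =>
      obtain ⟨k', v'⟩ := p
      by_cases h : k' = k <;> simp [pvSet, pvGet?, h, ih]

theorem pvGet?_set_ne (c : List (String × List Int)) (k k' : String) (v : List Int) (h : k' ≠ k) :
    pvGet? (pvSet c k v) k' = pvGet? c k' := by
  induction c with
  | nil => simp [pvSet, pvGet?, Ne.symm h]
  | cons p rest ih =>
      obtain ⟨k0, v0⟩ := p
      by_cases h0 : k0 = k
      · subst h0; simp [pvSet, pvGet?, Ne.symm h]
      · by_cases h1 : k0 = k' <;> simp [pvSet, pvGet?, h0, h1, ih, h]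

theorem pvSet_eq_self (c : List (String × List Int)) (k : String) (v : List Int)
    (h : pvGet? c k = some v) : pvSet c k v = c := by
  induction c with
  | nil => simp [pvGet?] at h
  | cons p rest ih =>
      obtain ⟨k0, v0⟩ := p
      by_cases h0 : k0 = k
      · subst h0
        simp [pvGet?] at h
        simp [pvSet, h]
      · simp [pvGet?, h0] at h
        simp [pvSet, h0, ih h]

theorem length_pvProduct (ls : List (List Int)) :
    (pvProduct ls).length = (ls.map List.length).prod := by
  induction ls with
  | nil => simp [pvProduct]
  | cons vs rest ih =>
      simp [pvProduct, List.length_flatMap, ih]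

theorem length_mem_pvProduct (ls : List (List Int)) (combo : List Int)
    (h : combo ∈ pvProduct ls) : combo.length = ls.length := by
  induction ls generalizing combo with
  | nil => simp [pvProduct] at h; simp [h]
  | cons vs rest ih =>
      simp only [pvProduct, List.mem_flatMap, List.mem_map] at h
      obtain ⟨v, _, c, hc, rfl⟩ := h
      simp [ih c hc]

theorem pvProduct_append_singleton (ls : List (List Int)) (vs : List Int) :
    pvProduct (ls ++ [vs]) = (pvProduct ls).flatMap (fun c => vs.map (fun v => c ++ [v])) := by
  induction ls with
  | nil =>
      show pvProduct [vs] = _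
      simp only [pvProduct]
      induction vs with
      | nil => rfl
      | cons v t iv => simp_all
  | cons l rest ih =>
      simp only [List.cons_append, pvProduct, ih, List.map_flatMap, List.flatMap_assoc,
        List.flatMap_map, List.map_map]
      simp [Function.comp_def]

theorem pvGet?_fold_of_not_key (l : List (String × Int)) (c : List (String × List Int)) (k : String)
    (h : ∀ p ∈ l, p.1 ≠ k) :
    pvGet? (l.foldl (fun c kv => pvSet c kv.1 [kv.2]) c) k = pvGet? c k := by
  induction l generalizing c with
  | nil => rfl
  | cons p rest ih =>
      simp only [List.foldl_cons]
      rw [ih _ (fun q hq => h q (List.mem_cons_of_mem _ hq)),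
        pvGet?_set_ne _ _ _ _ (fun hh => h p (List.mem_cons_self) hh.symm)]

theorem pvGet?_fold_of_key (l : List (String × Int)) (c : List (String × List Int)) (k : String)
    (h : ∃ p ∈ l, p.1 = k) :
    ∃ v, pvGet? (l.foldl (fun c kv => pvSet c kv.1 [kv.2]) c) k = some [v] := by
  induction l generalizing c with
  | nil => simp at h
  | cons p rest ih =>
      simp only [List.foldl_cons]
      by_cases hr : ∃ q ∈ rest, q.1 = k
      · exact ih _ hr
      · obtain ⟨q, hq, hqk⟩ := h
        rcases List.mem_cons.1 hq with rfl | hq'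
        · refine ⟨q.2, ?_⟩
          rw [pvGet?_fold_of_not_key _ _ _ (fun r hr' hrk => hr ⟨r, hr', hrk⟩), hqk,
            pvGet?_set_self]
        · exact absurd ⟨q, hq', hqk⟩ hr
-- A's inner pass pops each of the first n elements and appends its expansions
theorem pvInner_eq_aux (k : String) :
    ∀ (n : Nat) (subs : List (List (String × List Int))), n ≤ subs.length →
      pvInner k n subs =
        subs.drop n ++ (subs.take n).flatMap (fun s => (pvVals s k).map (fun v => pvSet s k [v])) := by
  intro n
  induction n with
  | zero => intro subs _; simp [pvInner]
  | succ n ih =>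
      intro subs hle
      match subs with
      | [] => simp at hle
      | s :: rest =>
          simp only [pvInner]
          rw [ih (rest ++ (pvVals s k).map (fun v => pvSet s k [v]))
            (by simp at hle ⊢; omega)]
          have hn : n ≤ rest.length := by simp at hle; omega
          rw [List.drop_append_of_le_length hn, List.take_append_of_le_length hn]
          simp [List.flatMap_cons]

theorem pvInner_eq (k : String) (subs : List (List (String × List Int))) :
    pvInner k subs.length subs = subs.flatMap (fun s => (pvVals s k).map (fun v => pvSet s k [v])) := by
  rw [pvInner_eq_aux k subs.length subs le_rfl]
  simp

theorem pvFlatMap_congr {α β : Type} (l : List α) (f g : α → List β)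
    (h : ∀ a ∈ l, f a = g a) : l.flatMap f = l.flatMap g := by
  induction l with
  | nil => rfl
  | cons a t ih =>
      simp only [List.flatMap_cons]
      rw [h a List.mem_cons_self, ih (fun b hb => h b (List.mem_cons_of_mem _ hb))]

theorem pvCastProd (f : String → Nat) (l : List String) :
    (((l.map f).prod : Nat) : Int) = (l.map (fun x => ((f x : Nat) : Int))).prod := by
  induction l with
  | nil => rfl
  | cons x t ih => simp [ih]

theorem pvLen0_eq (c : List (String × List Int)) (k : String) :
    pvLen0 c k = ((pvVals c k).length : Int) := by
  induction c with
  | nil => rfl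
  | cons p rest ih =>
      obtain ⟨k0, v0⟩ := p
      by_cases h : k0 = k
      · simp [pvLen0, pvVals, pvGet?, List.find?, h]
      · unfold pvLen0
        rw [List.find?_cons_of_neg (by simp [h])]
        simpa [pvLen0, pvVals, pvGet?, h] using ih

theorem pvMem_keys_iff (c : List (String × List Int)) (k : String) :
    k ∈ c.map Prod.fst ↔ (pvGet? c k).isSome = true := by
  induction c with
  | nil => simp [pvGet?]
  | cons p rest ih =>
      obtain ⟨k0, v0⟩ := p
      by_cases h : k0 = k
      · simp [pvGet?, h]
      · simp [pvGet?, h, ih, Ne.symm h]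

theorem pvIntProd_nonneg (c : List (String × List Int)) (consumed : List String) :
    0 ≤ pvIntProd c consumed := by
  induction consumed with
  | nil => simp [pvIntProd]
  | cons k rest ih =>
      simp only [pvIntProd, List.map_cons, List.prod_cons] at *
      exact mul_nonneg (Int.natCast_nonneg _) ih

theorem length_pvBuild (c : List (String × List Int)) (consumed : List String) :
    ((pvBuild c consumed).length : Int) = pvIntProd c consumed := by
  unfold pvBuild pvIntProd
  rw [List.length_map, length_pvProduct, List.map_map, pvCastProd]
  simp

-- expanding by a fresh present key extends the product by that key
theorem pvExpand_new (c : List (String × List Int)) (consumed : List String) (k : String)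
    (vs : List Int) (hk : k ∉ consumed) (hget : pvGet? c k = some vs) :
    (pvBuild c consumed).flatMap (fun s => (pvVals s k).map (fun v => pvSet s k [v]))
      = pvBuild c (consumed ++ [k]) := by
  unfold pvBuild
  rw [List.map_append]
  simp only [List.map_cons, List.map_nil]
  rw [pvProduct_append_singleton]
  simp only [List.flatMap_map, List.map_flatMap]
  apply pvFlatMap_congr  -- congruence over the combos
  intro combo hcombo
  have hlen : combo.length = consumed.length := by
    have := length_mem_pvProduct _ _ hcombo; simpa using this
  have hnk : ∀ p ∈ consumed.zip combo, p.1 ≠ k := by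
    intro p hp hpk
    exact hk (hpk ▸ (List.of_mem_zip hp).1)
  have hvals :
      pvVals ((consumed.zip combo).foldl (fun c kv => pvSet c kv.1 [kv.2]) c) k = vs := by
    unfold pvVals
    rw [pvGet?_fold_of_not_key _ _ _ hnk, hget]; rfl
  rw [hvals]
  rw [show pvVals c k = vs from by unfold pvVals; rw [hget]; rfl]
  simp only [List.map_map, Function.comp_def]
  apply List.map_congr_left
  intro v _
  rw [List.zip_append (by simp [hlen]), List.foldl_append]
  rfl

-- expanding by an already-consumed key is the identity: each sub-campaign holds a singleton there
theorem pvExpand_dup (c : List (String × List Int)) (consumed : List String) (k : String)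
    (hk : k ∈ consumed) :
    (pvBuild c consumed).flatMap (fun s => (pvVals s k).map (fun v => pvSet s k [v]))
      = pvBuild c consumed := by
  have h : ∀ s ∈ pvBuild c consumed, (pvVals s k).map (fun v => pvSet s k [v]) = [s] := by
    intro s hs
    unfold pvBuild at hs
    obtain ⟨combo, hcombo, rfl⟩ := List.mem_map.1 hs
    have hlen : combo.length = consumed.length := by
      have := length_mem_pvProduct _ _ hcombo; simpa using this
    have hex : ∃ p ∈ consumed.zip combo, p.1 = k := by
      obtain ⟨i, hi, rfl⟩ := List.mem_iff_getElem.1 hk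
      exact ⟨(consumed.zip combo)[i]'(by simp [hlen, hi]), List.getElem_mem _, by simp⟩
    obtain ⟨v, hv⟩ := pvGet?_fold_of_key _ c k hex
    have : pvVals ((consumed.zip combo).foldl (fun c kv => pvSet c kv.1 [kv.2]) c) k = [v] := by
      unfold pvVals; rw [hv]; rfl
    rw [this, List.map_singleton, pvSet_eq_self _ _ _ hv]
  rw [pvFlatMap_congr _ _ _ h]
  simp

theorem pvProdSet_perm (c : List (String × List Int)) (ks ks' : List String)
    (h : ∀ k, k ∈ ks ↔ k ∈ ks') : pvProdSet c ks = pvProdSet c ks' := by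
  unfold pvProdSet
  exact List.Perm.prod_eq <| List.Perm.map _ <|
    (List.perm_ext_iff_of_nodup (List.nodup_dedup ks) (List.nodup_dedup ks')).2
      (fun a => by simp only [List.mem_dedup]; exact h a)

theorem pvProdSet_eq_intProd (c : List (String × List Int)) (ks : List String)
    (h : ks.Nodup) : pvProdSet c ks = pvIntProd c ks := by
  unfold pvProdSet pvIntProd
  rw [List.dedup_eq_self.2 h]
  exact congrArg List.prod (List.map_congr_left (fun k _ => pvLen0_eq c k))

-- the main invariant: A's queue after consuming `consumed` is pvBuild c consumed, and its
-- length is the product pvConsume tracks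
theorem pvLoop_main (c : List (String × List Int)) (nb : Int) :
    ∀ (cl consumed : List String) (prod : Int), consumed.Nodup → prod = pvIntProd c consumed →
      (∀ j, j < cl.length →
        0 < pvProdSet c (consumed ++ cl.take j) → pvProdSet c (consumed ++ cl.take j) < nb →
          cl.getD j "" ∈ c.map Prod.fst) →
      pvLoopA nb cl (pvBuild c consumed) = pvBuild c (pvConsume c nb cl consumed prod) := by
  intro cl
  induction cl with
  | nil => intro consumed prod _ _ _; rfl
  | cons k rest ih =>
      intro consumed prod hnd hprod hpre
      simp only [pvLoopA, pvConsume, length_pvBuild, ← hprod]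
      by_cases hlt : nb > prod
      · simp only [if_pos hlt]
        by_cases hk : k ∈ consumed
        · rw [if_pos (by simpa [List.contains_iff_mem] using hk)]
          rw [pvInner_eq, pvExpand_dup c consumed k hk]
          apply ih consumed prod hnd hprod
          intro j hj hpos hsmall
          have hmem : ∀ a, a ∈ consumed ++ rest.take j ↔ a ∈ consumed ++ (k :: rest).take (j + 1) := by
            intro a
            simp only [List.take_succ_cons, List.mem_append, List.mem_cons]
            constructor
            · rintro (ha | ha) <;> simp [ha]
            · rintro (ha | ha)
              · simp [ha]
              · rcases ha with rfl | ha
                · simp [hk]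
                · simp [ha]
          rw [pvProdSet_perm c _ _ hmem] at hpos hsmall
          exact hpre (j + 1) (by simpa using hj) hpos hsmall
        · rw [if_neg (by simp; exact hk)]
          rw [pvInner_eq]
          have hnd' : (consumed ++ [k]).Nodup := by
            simp only [List.nodup_append, List.nodup_cons, List.not_mem_nil, not_false_iff,
              List.nodup_nil, and_true, true_and]
            refine ⟨hnd, ?_⟩
            intro a ha
            simp
            exact fun hak => hk (hak ▸ ha)
          have hprod' : prod * ((pvVals c k).length : Int) = pvIntProd c (consumed ++ [k]) := by
            unfold pvIntProd at hprod ⊢; simp [hprod]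
          have hpre' : ∀ j, j < rest.length →
              0 < pvProdSet c ((consumed ++ [k]) ++ rest.take j) →
              pvProdSet c ((consumed ++ [k]) ++ rest.take j) < nb →
                rest.getD j "" ∈ c.map Prod.fst := by
            intro j hj hpos hsmall
            rw [List.append_assoc] at hpos hsmall
            exact hpre (j + 1) (by simpa using hj) hpos hsmall
          rcases lt_or_eq_of_le (pvIntProd_nonneg c consumed) with hposc | hzero
          · -- prod > 0: the key must be present, by Pre_
            have hpres : (pvGet? c k).isSome = true := by
              rw [← pvMem_keys_iff]
              have := hpre 0 (by simp) ?_ ?_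
              · simpa using this
              · simpa [pvProdSet_eq_intProd c consumed hnd, ← hprod] using hposc
              · simpa [pvProdSet_eq_intProd c consumed hnd, ← hprod] using hlt
            obtain ⟨vs, hvs⟩ := Option.isSome_iff_exists.1 hpres
            rw [pvExpand_new c consumed k vs hk hvs]
            exact ih (consumed ++ [k]) _ hnd' hprod' hpre'
          · -- prod = 0: the queue is empty and stays empty
            have hb0 : pvBuild c consumed = [] := by
              have := length_pvBuild c consumed
              rw [← hzero] at this
              exact List.eq_nil_of_length_eq_zero (by exact_mod_cast this)
            have hb0' : pvBuild c (consumed ++ [k]) = [] := by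
              have hz : pvIntProd c (consumed ++ [k]) = 0 := by
                rw [← hprod'] ; rw [hprod, ← hzero]; ring
              have := length_pvBuild c (consumed ++ [k])
              rw [hz] at this
              exact List.eq_nil_of_length_eq_zero (by exact_mod_cast this)
            rw [hb0]
            simp only [List.flatMap_nil]
            rw [← hb0']
            exact ih (consumed ++ [k]) _ hnd' hprod' hpre'
      · simp [if_neg hlt]

-- ===== VERDICT (by name: the statement is the Claim_ definition above) =====
theorem divise_campagnes_spec : Claim_equal_divise_campagnes := by
  intro campagne cles nbprocs _ hpre
  unfold Spec_divise_campagnes divise_campagnes divise_campagnes_alt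
  have h0 : pvBuild campagne [] = [campagne] := rfl
  rw [← h0]
  exact pvLoop_main campagne nbprocs cles [] 1 List.nodup_nil rfl
    (fun j hj hpos hsmall => hpre j (List.mem_range.2 hj) (by simpa using hpos) (by simpa using hsmall))
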